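-- pv_equiv track=rewrite | github.com/pranitashedage1/Coding-Practice | Hashing/Basics/sum_of_subarray_given_number.py | check
-- ===== SOURCE A (Python) =====
-- def check(arr, x):
--     prefix_sum = 0
--     s1 = {0}
--     for i in arr:
--         prefix_sum += i
--         if (prefix_sum-x) in s1:
--             return True
--         s1.add(prefix_sum)
--     return False
-- ===== SOURCE B (Python) =====
-- def check(arr, x):
--     n = len(arr)
--     for i in range(n):
--         running = 0
--         for j in range(i, n):
--             running += arr[j]
--             if running == x:
--                 return True
--     return False
-- ===== Notes on version B (the rewrite author's own statement) =====
-- stated objective: alternative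
-- what changed: Replaced the prefix-sum hash-set scan with a direct brute-force double loop that re-sums every window starting at each index.
import Mathlib
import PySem

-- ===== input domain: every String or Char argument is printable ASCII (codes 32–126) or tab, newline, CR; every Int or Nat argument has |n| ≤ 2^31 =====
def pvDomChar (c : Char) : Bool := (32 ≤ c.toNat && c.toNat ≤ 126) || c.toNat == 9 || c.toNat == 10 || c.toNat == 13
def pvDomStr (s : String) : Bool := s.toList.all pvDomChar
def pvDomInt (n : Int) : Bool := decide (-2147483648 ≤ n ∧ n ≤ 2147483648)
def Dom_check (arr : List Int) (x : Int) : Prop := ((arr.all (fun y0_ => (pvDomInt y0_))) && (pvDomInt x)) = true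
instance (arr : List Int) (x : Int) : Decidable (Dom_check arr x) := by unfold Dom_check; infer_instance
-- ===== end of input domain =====

-- B replaces A's prefix-sum set scan with a brute-force double loop over all window starts (alternative algorithm, not faster).

-- ===== PORT A =====
-- the 'for i in arr' loop with early return, carrying prefix_sum and the set s1
def checkGo (x : Int) : List Int → Int → PySem.Set Int → Bool
  | [], _, _ => false
  | i :: rest, prefixSum, s1 =>
    let p := prefixSum + i
    if PySem.Set.contains s1 (p - x) then true
    else checkGo x rest p (PySem.Set.add s1 p)

def check (arr : List Int) (x : Int) : Bool :=
  checkGo x arr 0 (PySem.Set.ofList [0])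

-- ===== PORT B =====
-- inner loop: running sum over arr[j] for j in range(i, n), i.e. over the suffix
def checkInner (x : Int) : List Int → Int → Bool
  | [], _ => false
  | v :: rest, running =>
    if running + v == x then true else checkInner x rest (running + v)

-- outer loop over start indices i = successive suffixes of arr
def checkOuter (x : Int) : List Int → Bool
  | [] => false
  | a :: t => if checkInner x (a :: t) 0 then true else checkOuter x t

def check_alt (arr : List Int) (x : Int) : Bool := checkOuter x arr

-- ===== PRECONDITION & SPEC =====
def Spec_check (arr : List Int) (x : Int) (out : Bool) : Prop := out = check_alt arr x
instance (arr : List Int) (x : Int) (out : Bool) : Decidable (Spec_check arr x out) := by unfold Spec_check; infer_instance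

-- ===== CLAIM (what is proved, stated in full; the proofs are below) =====
def Claim_equal_check : Prop := ∀ (arr : List Int) (x : Int), Dom_check arr x → Spec_check arr x (check arr x)

-- ===== LEMMAS AND PROOFS =====

-- a nonempty contiguous subarray of l sums to x
def SubSum (x : Int) (l : List Int) : Prop :=
  ∃ pre mid post, l = pre ++ mid ++ post ∧ mid ≠ [] ∧ mid.sum = x

-- a proper split of mid into two nonempty pieces whose second piece sums to x
def Pair (x : Int) (mid : List Int) : Prop :=
  ∃ m1 m2, mid = m1 ++ m2 ∧ m1 ≠ [] ∧ m2 ≠ [] ∧ m2.sum = x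

lemma pair_cons (x i : Int) (mid : List Int) :
    Pair x (i :: mid) ↔ (mid ≠ [] ∧ mid.sum = x) ∨ Pair x mid := by
  constructor
  · rintro ⟨m1, m2, heq, h1, h2, hs⟩
    cases m1 with
    | nil => exact absurd rfl h1
    | cons a m1' =>
      simp only [List.cons_append, List.cons.injEq] at heq
      obtain ⟨rfl, rfl⟩ := heq
      cases m1' with
      | nil => exact Or.inl ⟨by simpa using h2, hs⟩
      | cons b m1'' => exact Or.inr ⟨b :: m1'', m2, rfl, by simp, h2, hs⟩
  · rintro (⟨hm, hs⟩ | ⟨m1, m2, rfl, h1, h2, hs⟩)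
    · exact ⟨[i], mid, rfl, by simp, hm, hs⟩
    · exact ⟨i :: m1, m2, rfl, by simp, h2, hs⟩

lemma checkInner_iff (x : Int) (l : List Int) (r : Int) :
    checkInner x l r = true ↔ ∃ mid post, l = mid ++ post ∧ mid ≠ [] ∧ r + mid.sum = x := by
  induction l generalizing r with
  | nil => simp [checkInner]
  | cons v rest ih =>
    simp only [checkInner]
    by_cases h : r + v = x
    · simp only [h, beq_self_eq_true, if_true, true_iff]
      exact ⟨[v], rest, rfl, by simp, by simpa using h⟩
    · rw [if_neg (by simpa using h), ih]
      constructor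
      · rintro ⟨mid, post, rfl, hm, hs⟩
        exact ⟨v :: mid, post, rfl, by simp, by simpa [add_assoc] using hs⟩
      · rintro ⟨mid, post, heq, hm, hs⟩
        cases mid with
        | nil => exact absurd rfl hm
        | cons a mid' =>
          simp only [List.cons_append, List.cons.injEq] at heq
          obtain ⟨rfl, rfl⟩ := heq
          cases mid' with
          | nil => exact absurd (by simpa using hs) h
          | cons b mid'' =>
            exact ⟨b :: mid'', post, rfl, by simp, by
              simpa [add_assoc] using hs⟩

lemma checkOuter_iff (x : Int) (l : List Int) :
    checkOuter x l = true ↔ SubSum x l := by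
  induction l with
  | nil => simp [checkOuter, SubSum]
  | cons a t ih =>
    simp only [checkOuter]
    by_cases h : checkInner x (a :: t) 0 = true
    · rw [if_pos h]
      obtain ⟨mid, post, heq, hm, hs⟩ := (checkInner_iff x (a :: t) 0).mp h
      simp only [true_iff]
      exact ⟨[], mid, post, by simpa using heq, hm, by simpa using hs⟩
    · rw [if_neg h, ih]
      constructor
      · rintro ⟨pre, mid, post, rfl, hm, hs⟩
        exact ⟨a :: pre, mid, post, rfl, hm, hs⟩
      · rintro ⟨pre, mid, post, heq, hm, hs⟩
        cases pre with
        | nil =>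
          exact absurd ((checkInner_iff x (a :: t) 0).mpr
            ⟨mid, post, by simpa using heq, hm, by simpa using hs⟩) h
        | cons b pre' =>
          simp only [List.cons_append, List.cons.injEq] at heq
          obtain ⟨rfl, rfl⟩ := heq
          exact ⟨pre', mid, post, rfl, hm, hs⟩

lemma checkGo_iff (x : Int) (l : List Int) (p : Int) (s : PySem.Set Int) :
    checkGo x l p s = true ↔
      ∃ mid post, l = mid ++ post ∧ mid ≠ [] ∧
        ((p + mid.sum - x) ∈ s ∨ Pair x mid) := by
  induction l generalizing p s with
  | nil => simp [checkGo]
  | cons i rest ih =>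
    simp only [checkGo]
    by_cases h : (p + i - x) ∈ s
    · rw [if_pos (by simpa [PySem.Set.contains_iff] using h)]
      simp only [true_iff]
      exact ⟨[i], rest, rfl, by simp, Or.inl (by simpa using h)⟩
    · rw [if_neg (by simpa [PySem.Set.contains_iff] using h), ih]
      constructor
      · rintro ⟨mid, post, rfl, hm, hd⟩
        refine ⟨i :: mid, post, rfl, by simp, ?_⟩
        rcases hd with hd | hd
        · rw [PySem.Set.mem_add] at hd
          rcases hd with hd | hd
          · exact Or.inl (by simpa [add_assoc] using hd)
          · refine Or.inr ((pair_cons x i mid).mpr (Or.inl ⟨hm, by linarith⟩))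
        · exact Or.inr ((pair_cons x i mid).mpr (Or.inr hd))
      · rintro ⟨mid, post, heq, hm, hd⟩
        cases mid with
        | nil => exact absurd rfl hm
        | cons a mid' =>
          simp only [List.cons_append, List.cons.injEq] at heq
          obtain ⟨rfl, rfl⟩ := heq
          rcases hd with hd | hd
          · -- membership in s; mid' must be nonempty since (p+i-x) ∉ s
            cases mid' with
            | nil => exact absurd (by simpa using hd) h
            | cons b mid'' =>
              refine ⟨b :: mid'', post, rfl, by simp, Or.inl ?_⟩
              rw [PySem.Set.mem_add]
              exact Or.inl (by simpa [add_assoc] using hd)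
          · rcases (pair_cons x i mid').mp hd with ⟨hm', hs'⟩ | hp
            · refine ⟨mid', post, rfl, hm', Or.inl ?_⟩
              rw [PySem.Set.mem_add]
              exact Or.inr (by linarith)
            · obtain ⟨m1, m2, rfl, h1, h2, hs⟩ := hp
              exact ⟨m1 ++ m2, post, rfl, by simp [h1], Or.inr ⟨m1, m2, rfl, h1, h2, hs⟩⟩

lemma check_iff (arr : List Int) (x : Int) : check arr x = true ↔ SubSum x arr := by
  rw [check, checkGo_iff]
  constructor
  · rintro ⟨mid, post, rfl, hm, hd⟩
    rcases hd with hd | hd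
    · refine ⟨[], mid, post, rfl, hm, ?_⟩
      have : (0 : Int) + mid.sum - x = 0 := by
        simpa [PySem.Set.ofList] using hd
      linarith
    · obtain ⟨m1, m2, rfl, h1, h2, hs⟩ := hd
      exact ⟨m1, m2, post, by simp, h2, hs⟩
  · rintro ⟨pre, mid, post, rfl, hm, hs⟩
    cases pre with
    | nil =>
      refine ⟨mid, post, by simp, hm, Or.inl ?_⟩
      simp [PySem.Set.ofList, hs]
    | cons a pre' =>
      refine ⟨(a :: pre') ++ mid, post, by simp, by simp, Or.inr ?_⟩
      exact ⟨a :: pre', mid, rfl, by simp, hm, hs⟩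

-- ===== VERDICT (by name: the statement is the Claim_ definition above) =====
theorem check_spec : Claim_equal_check := by
  intro arr x _
  unfold Spec_check check_alt
  have h1 := check_iff arr x
  have h2 := checkOuter_iff x arr
  cases hA : check arr x <;> cases hB : checkOuter x arr <;> simp_all
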